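-- pv_equiv track=rewrite | github.com/Dsavvi180/Computing-and-Numerics | submission1.py | sequence_element
-- ===== SOURCE A (Python) =====
-- def sequence_element(n):
--     if n < 0:
--         raise ValueError("Invalid values provided.")
--     sequence = [1, 2] + [None for i in range(2, n+1)]
--     current = 2
--     while current <= n:
--         previous = current - 1
--         second_previous = current-2
--         if sequence[previous] % 2 == 0:
--             sequence[current] = 3*sequence[second_previous]
--         else:
--             sequence[current] = 2*sequence[previous]-sequence[second_previous]
--         current += 1
--     return sequence[n]
-- ===== SOURCE B (Python) =====
-- def sequence_element(n):
--     if n < 0: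
--         raise ValueError("Invalid values provided.")
--     k, r = divmod(n, 2)
--     if r == 0:
--         return 3 ** k
--     return (3 ** (k + 1) + (1 if k % 2 == 0 else -1)) // 2
-- ===== Notes on version B (the rewrite author's own statement) =====
-- stated objective: faster
-- what changed: Replaces the O(n) list-filling recurrence loop with the closed form 3^(n//2) for even n and (3^(n//2+1) +/- 1)//2 for odd n, computed via Python's built-in fast exponentiation.
import Mathlib
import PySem

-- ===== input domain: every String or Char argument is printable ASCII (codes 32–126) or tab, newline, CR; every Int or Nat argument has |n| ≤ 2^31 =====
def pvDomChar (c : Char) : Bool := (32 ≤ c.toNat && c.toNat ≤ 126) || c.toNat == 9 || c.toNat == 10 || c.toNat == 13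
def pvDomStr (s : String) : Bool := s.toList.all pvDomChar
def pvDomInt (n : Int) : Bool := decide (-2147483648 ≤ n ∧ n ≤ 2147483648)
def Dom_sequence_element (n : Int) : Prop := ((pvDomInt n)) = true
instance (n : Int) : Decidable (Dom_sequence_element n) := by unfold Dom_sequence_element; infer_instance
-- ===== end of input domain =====

-- B replaces A's O(n) list-filling loop with the closed form 3^(n//2) (even n) /
-- (3^(n//2+1) ± 1)//2 (odd n) via built-in fast exponentiation (objective: faster).

-- ===== PORT A =====
-- while-loop of A; `.getD 0` / pySetD defaults are only reached where Python would
-- raise IndexError, which cannot happen for 0 ≤ n (excluded by Pre_ otherwise).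
def seqLoopA (n : Int) (seq : List (Option Int)) (current : Int) : List (Option Int) :=
  if _h : current ≤ n then
    let previous := current - 1
    let second_previous := current - 2
    let pv := (PySem.List.pyGetD seq previous none).getD 0
    let spv := (PySem.List.pyGetD seq second_previous none).getD 0
    let seq' :=
      if PySem.Int.mod pv 2 = 0 then PySem.List.pySetD seq current (some (3 * spv))
      else PySem.List.pySetD seq current (some (2 * pv - spv))
    seqLoopA n seq' (current + 1)
  else seq
termination_by (n + 1 - current).toNat
decreasing_by omega

def sequence_element (n : Int) : Int :=
  let sequence : List (Option Int) :=
    [some 1, some 2] ++ (PySem.List.pyRange 2 (n + 1) 1).map (fun _ => none)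
  let final := seqLoopA n sequence 2
  (PySem.List.pyGetD final n (some 0)).getD 0

-- ===== PORT B =====
def sequence_element_alt (n : Int) : Int :=
  let k := PySem.Int.floordiv n 2
  if PySem.Int.mod n 2 = 0 then 3 ^ k.toNat
  else PySem.Int.floordiv (3 ^ (k + 1).toNat + (if PySem.Int.mod k 2 = 0 then 1 else -1)) 2

-- ===== PRECONDITION & SPEC =====
-- Pre_ excludes n < 0, where Python A raises ValueError (B raises there too).
def Pre_sequence_element (n : Int) : Prop := 0 ≤ n
instance (n : Int) : Decidable (Pre_sequence_element n) := by unfold Pre_sequence_element; infer_instance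
def pvWitness_sequence_element : Int := 5

def Spec_sequence_element (n : Int) (out : Int) : Prop := out = sequence_element_alt n
instance (n : Int) (out : Int) : Decidable (Spec_sequence_element n out) := by unfold Spec_sequence_element; infer_instance

-- ===== CLAIM (what is proved, stated in full; the proofs are below) =====
def Claim_equal_sequence_element : Prop := ∀ (n : Int), Dom_sequence_element n → Pre_sequence_element n → Spec_sequence_element n (sequence_element n)

-- ===== LEMMAS AND PROOFS =====

-- mathematical model of A's recurrence
def fModel : Nat → Int
  | 0 => 1
  | 1 => 2
  | (i + 2) => if fModel (i + 1) % 2 = 0 then 3 * fModel i else 2 * fModel (i + 1) - fModel i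

lemma pow3_odd (k : Nat) : (3 : Int) ^ k % 2 = 1 := by
  induction k with
  | zero => decide
  | succ k ih => rw [pow_succ]; omega

lemma pow3_neg_one (k : Nat) : (4 : Int) ∣ 3 ^ (k + 1) + (-1) ^ k := by
  induction k with
  | zero => decide
  | succ k ih =>
    have : (3 : Int) ^ (k + 2) + (-1) ^ (k + 1)
        = 3 * (3 ^ (k + 1) + (-1) ^ k) - 4 * (-1) ^ k := by ring
    rw [this]
    exact dvd_sub (Dvd.dvd.mul_left ih 3) (Dvd.dvd.mul_right dvd_rfl _)

lemma fModel_closed (k : Nat) :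
    fModel (2 * k) = 3 ^ k ∧ 2 * fModel (2 * k + 1) = 3 ^ (k + 1) + (-1) ^ k := by
  induction k with
  | zero => decide
  | succ k ih =>
    obtain ⟨he, ho⟩ := ih
    have hodd_even : fModel (2 * k + 1) % 2 = 0 := by
      obtain ⟨c, hc⟩ := pow3_neg_one k
      rw [← ho] at hc
      omega
    have he' : fModel (2 * k + 2) = 3 ^ (k + 1) := by
      show fModel (2 * k + 2) = 3 ^ (k + 1)
      rw [show (2 * k + 2) = (2 * k) + 2 from rfl, fModel, if_pos hodd_even, he, pow_succ]
      ring
    have heven_odd : fModel (2 * k + 2) % 2 = 1 := by rw [he']; exact pow3_odd (k + 1)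
    constructor
    · rw [show 2 * (k + 1) = 2 * k + 2 by ring]; exact he'
    · have hne : ¬ fModel (2 * k + 1 + 1) % 2 = 0 := by
        rw [show 2 * k + 1 + 1 = 2 * k + 2 by ring]; omega
      rw [show 2 * (k + 1) + 1 = (2 * k + 1) + 2 by ring, fModel, if_neg hne, he']
      have : (-1 : Int) ^ (k + 1) = -(-1) ^ k := by rw [pow_succ]; ring
      rw [this]
      have : 2 * (2 * (3 ^ (k + 1)) - fModel (2 * k + 1))
          = 4 * 3 ^ (k + 1) - 2 * fModel (2 * k + 1) := by ring
      rw [this, ho]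
      rw [show (3 : Int) ^ (k + 1 + 1) = 3 * 3 ^ (k + 1) by rw [pow_succ]; ring]
      ring

-- loop invariant for A's while-loop
lemma seqLoopA_invariant (n : Int) (hn : 0 ≤ n) :
    ∀ (d c : Nat) (seq : List (Option Int)),
      d = n.toNat + 1 - c → 2 ≤ c →
      seq.length = 2 + (n - 1).toNat →
      (∀ i : Nat, i < c → i < seq.length → seq[i]? = some (some (fModel i))) →
      ∀ i : Nat, i ≤ n.toNat → (seqLoopA n seq (c : Int))[i]? = some (some (fModel i)) := by
  intro d
  induction d with
  | zero =>
    intro c seq hd hc hlen hinv i hi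
    rw [seqLoopA, dif_neg (by omega)]
    exact hinv i (by omega) (by omega)
  | succ d ih =>
    intro c seq hd hc hlen hinv i hi
    have hcle : (c : Int) ≤ n := by omega
    rw [seqLoopA, dif_pos hcle]
    simp only []
    have hprev : (c : Int) - 1 = ((c - 1 : Nat) : Int) := by omega
    have hsprev : (c : Int) - 2 = ((c - 2 : Nat) : Int) := by omega
    have hc1 : c - 1 < seq.length := by omega
    have hc2 : c - 2 < seq.length := by omega
    have hget1 : PySem.List.pyGetD seq ((c : Int) - 1) none = some (fModel (c - 1)) := by
      rw [hprev, PySem.List.pyGetD_natCast, List.getD_eq_getElem?_getD,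
        hinv (c - 1) (by omega) hc1]; rfl
    have hget2 : PySem.List.pyGetD seq ((c : Int) - 2) none = some (fModel (c - 2)) := by
      rw [hsprev, PySem.List.pyGetD_natCast, List.getD_eq_getElem?_getD,
        hinv (c - 2) (by omega) hc2]; rfl
    rw [hget1, hget2]
    simp only [Option.getD_some]
    have hmod : PySem.Int.mod (fModel (c - 1)) 2 = fModel (c - 1) % 2 :=
      PySem.Int.mod_eq_emod_of_pos (by norm_num)
    have hcint : PySem.List.pySetD seq (c : Int) = fun v => seq.set c v := by
      funext v; exact PySem.List.pySetD_natCast seq c v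
    have hfc : fModel c = if fModel (c - 1) % 2 = 0
        then 3 * fModel (c - 2) else 2 * fModel (c - 1) - fModel (c - 2) := by
      rw [show c = (c - 2) + 2 by omega, fModel]
      rw [show c - 2 + 2 - 1 = (c - 2) + 1 by omega, show (c-2)+2-2 = c - 2 by omega]
    set v : Option Int := some (if fModel (c - 1) % 2 = 0
        then 3 * fModel (c - 2) else 2 * fModel (c - 1) - fModel (c - 2)) with hv
    have hstep : (if PySem.Int.mod (fModel (c-1)) 2 = 0
          then PySem.List.pySetD seq (c : Int) (some (3 * fModel (c - 2)))
          else PySem.List.pySetD seq (c : Int) (some (2 * fModel (c-1) - fModel (c - 2))))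
        = seq.set c v := by
      rw [hmod, hcint, hv]
      split_ifs <;> rfl
    rw [hstep]
    have hcc : ((c : Int) + 1) = ((c + 1 : Nat) : Int) := by omega
    rw [hcc]
    apply ih (c + 1) (seq.set c v) (by omega) (by omega) (by simp [hlen])
    · intro j hj hjlen
      rcases Nat.lt_or_ge j c with hjc | hjc
      · rw [List.getElem?_set_ne (by omega)]
        exact hinv j hjc (by simpa using hjlen)
      · have hjeq : j = c := by omega
        subst hjeq
        rw [List.getElem?_set_self (by simpa using hjlen), hv, hfc]
    · exact hi

-- A's port computes the model
lemma sequence_element_eq_model (n : Int) (hn : 0 ≤ n) :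
    sequence_element n = fModel n.toNat := by
  unfold sequence_element
  simp only []
  set L : List (Option Int) :=
    [some 1, some 2] ++ (PySem.List.pyRange 2 (n + 1) 1).map (fun _ => none) with hL
  have hlen : L.length = 2 + (n - 1).toNat := by
    rw [hL]
    simp [PySem.List.length_pyRange_one]
    omega
  have hfinal : ∀ i : Nat, i ≤ n.toNat → (seqLoopA n L ((2 : Nat) : Int))[i]? = some (some (fModel i)) := by
    apply seqLoopA_invariant n hn (n.toNat + 1 - 2) 2 L rfl (by omega) hlen
    intro i hi hilen
    interval_cases i
    · rw [hL]; rfl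
    · rw [hL]; rfl
  have h2 : ((2 : Nat) : Int) = (2 : Int) := by norm_num
  rw [← h2]
  have hres := hfinal n.toNat (le_refl _)
  rw [PySem.List.pyGetD_of_nonneg _ _ hn, List.getD_eq_getElem?_getD, hres]
  rfl

-- B's port computes the model too
lemma sequence_element_alt_eq_model (n : Int) (hn : 0 ≤ n) :
    sequence_element_alt n = fModel n.toNat := by
  unfold sequence_element_alt
  simp only []
  have hfd : PySem.Int.floordiv n 2 = n / 2 := PySem.Int.floordiv_eq_ediv_of_pos (by norm_num)
  have hmd : PySem.Int.mod n 2 = n % 2 := PySem.Int.mod_eq_emod_of_pos (by norm_num)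
  rcases Int.even_or_odd n with ⟨m, hm⟩ | ⟨m, hm⟩
  · have hm0 : 0 ≤ m := by omega
    have hmod0 : PySem.Int.mod n 2 = 0 := by rw [hmd]; omega
    rw [if_pos hmod0]
    have hk : (PySem.Int.floordiv n 2).toNat = m.toNat := by rw [hfd]; omega
    rw [hk, show n.toNat = 2 * m.toNat by omega]
    exact ((fModel_closed m.toNat).1).symm
  · have hm0 : 0 ≤ m := by omega
    have hmod1 : PySem.Int.mod n 2 = 1 := by rw [hmd]; omega
    rw [if_neg (by omega)]
    have hkval : PySem.Int.floordiv n 2 = m := by rw [hfd]; omega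
    have hk1 : (PySem.Int.floordiv n 2 + 1).toNat = m.toNat + 1 := by rw [hkval]; omega
    have hmodk : PySem.Int.mod (PySem.Int.floordiv n 2) 2
        = m % 2 := by rw [hkval]; exact PySem.Int.mod_eq_emod_of_pos (by norm_num)
    have hclosed := (fModel_closed m.toNat).2
    have hnt : n.toNat = 2 * m.toNat + 1 := by omega
    rw [hk1, hmodk, hnt]
    have hsign : (if m % 2 = 0 then (1 : Int) else -1) = (-1) ^ m.toNat := by
      rcases Nat.even_or_odd m.toNat with he | ho
      · obtain ⟨t, ht⟩ := he
        rw [if_pos (by omega), Even.neg_one_pow ⟨t, ht⟩]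
      · obtain ⟨t, ht⟩ := ho
        rw [if_neg (by omega), Odd.neg_one_pow ⟨t, ht⟩]
    rw [hsign]
    have : 3 ^ (m.toNat + 1) + (-1 : Int) ^ m.toNat = 2 * fModel (2 * m.toNat + 1) := hclosed.symm
    rw [this]
    rw [PySem.Int.floordiv_eq_ediv_of_pos (by norm_num)]
    omega

-- ===== VERDICT (by name: the statement is the Claim_ definition above) =====
theorem sequence_element_spec : Claim_equal_sequence_element := by
  intro n _hdom hpre
  unfold Spec_sequence_element
  rw [sequence_element_eq_model n hpre, sequence_element_alt_eq_model n hpre]
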